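-- pv_equiv track=rewrite | github.com/fanwenbin-shu/ePCC2 | PCC/util.py | get_pbc_list
-- ===== SOURCE A (Python) =====
-- def get_pbc_list(im):
--     '''
--     get an integer list from -im to im, like [-2, -1, 0, 1, 2] when im=2.
--     :param im: integer
--     :return: list
--     '''
--     l = []
--     if im == 0:
--         return [0]
--     else:
--         for i in range(im+1):
--             if i != 0:
--                 l.append(-i)
--                 l.append(i)
--             else:
--                 l.append(0)
--     l.sort()
--
--     return l
-- ===== SOURCE B (Python) =====
-- def get_pbc_list(im):
--     """Integer list from -im to im, generated directly in ascending order (no sort pass)."""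
--     return list(range(-im, im + 1))
-- ===== Notes on version B (the rewrite author's own statement) =====
-- stated objective: simpler
-- what changed: B generates the integers directly in ascending order with a single range(-im, im+1), replacing A's symmetric +/- pair-appending loop followed by a separate sort pass.
import Mathlib
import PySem

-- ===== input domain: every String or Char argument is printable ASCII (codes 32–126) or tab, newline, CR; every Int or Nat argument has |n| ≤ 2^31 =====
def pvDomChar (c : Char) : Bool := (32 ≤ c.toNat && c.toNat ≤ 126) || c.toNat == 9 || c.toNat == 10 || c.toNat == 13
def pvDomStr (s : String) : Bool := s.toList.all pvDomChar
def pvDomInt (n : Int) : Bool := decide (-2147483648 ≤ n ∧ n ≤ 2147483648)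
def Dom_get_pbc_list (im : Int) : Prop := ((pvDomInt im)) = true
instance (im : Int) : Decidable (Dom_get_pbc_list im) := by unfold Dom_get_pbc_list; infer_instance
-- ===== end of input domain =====

-- B builds the ascending list directly with one range(-im, im+1); A appends ±i pairs and sorts.

-- ===== PORT A =====
def get_pbc_list (im : Int) : List Int :=
  if im == 0 then [0]
  else
    let l := (PySem.List.pyRange 0 (im + 1) 1).foldl
      (fun l i => if i ≠ 0 then (l ++ [-i]) ++ [i] else l ++ [0]) []
    PySem.List.sorted l (fun x => x) false

-- ===== PORT B =====
def get_pbc_list_alt (im : Int) : List Int :=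
  PySem.List.pyRange (-im) (im + 1) 1

-- ===== PRECONDITION & SPEC =====
def Spec_get_pbc_list (im : Int) (out : List Int) : Prop := out = get_pbc_list_alt im
instance (im : Int) (out : List Int) : Decidable (Spec_get_pbc_list im out) := by unfold Spec_get_pbc_list; infer_instance

-- ===== CLAIM (what is proved, stated in full; the proofs are below) =====
def Claim_equal_get_pbc_list : Prop := ∀ (im : Int), Dom_get_pbc_list im → Spec_get_pbc_list im (get_pbc_list im)

-- ===== LEMMAS AND PROOFS =====

-- A's pre-sort list over range(0, n+1) is a permutation of the ascending range -n..n.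
theorem pv_fold_perm (n : Nat) :
    ((PySem.List.pyRange 0 ((n : Int) + 1) 1).foldl
      (fun l i => if i ≠ 0 then (l ++ [-i]) ++ [i] else l ++ [0]) []).Perm
      (PySem.List.pyRange (-(n : Int)) ((n : Int) + 1) 1) := by
  induction n with
  | zero => decide
  | succ m ih =>
    have h1 : PySem.List.pyRange 0 ((m + 1 : Nat) + 1) 1
        = PySem.List.pyRange 0 ((m : Int) + 1) 1 ++ [(m : Int) + 1] := by
      have := PySem.List.pyRange_one_succ_right (a := 0) (b := (m : Int) + 1) (by push_cast; omega)
      push_cast at this ⊢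
      rw [this]
    have h2 : PySem.List.pyRange (-((m + 1 : Nat) : Int)) (((m + 1 : Nat) : Int) + 1) 1
        = -((m : Int) + 1) :: (PySem.List.pyRange (-(m : Int)) ((m : Int) + 1) 1 ++ [(m : Int) + 1]) := by
      have hc := PySem.List.pyRange_one_cons (a := -((m : Int) + 1)) (b := ((m : Int) + 1) + 1) (by omega)
      have hs := PySem.List.pyRange_one_succ_right (a := -((m : Int) + 1) + 1) (b := (m : Int) + 1) (by omega)
      push_cast
      rw [hc, hs]
      norm_num
    rw [h1, h2, List.foldl_append]
    have hstep : ((PySem.List.pyRange 0 ((m : Int) + 1) 1).foldl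
        (fun l i => if i ≠ 0 then (l ++ [-i]) ++ [i] else l ++ [0]) []) ++ [-((m : Int) + 1), (m : Int) + 1]
        = [(m : Int) + 1].foldl (fun l i => if i ≠ 0 then (l ++ [-i]) ++ [i] else l ++ [0])
            ((PySem.List.pyRange 0 ((m : Int) + 1) 1).foldl
              (fun l i => if i ≠ 0 then (l ++ [-i]) ++ [i] else l ++ [0]) []) := by
      simp [List.foldl]
      omega
    push_cast at ih ⊢
    rw [← hstep]
    refine List.Perm.trans (ih.append_right _) ?_
    have := (List.perm_middle (a := -((m : Int) + 1))
      (l₁ := PySem.List.pyRange (-(m : Int)) ((m : Int) + 1) 1) (l₂ := [(m : Int) + 1])).symm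
    simpa using this

-- ===== VERDICT (by name: the statement is the Claim_ definition above) =====
theorem get_pbc_list_spec : Claim_equal_get_pbc_list := by
  intro im _
  show get_pbc_list im = get_pbc_list_alt im
  unfold get_pbc_list get_pbc_list_alt
  rcases lt_trichotomy im 0 with hneg | hz | hpos
  · have h0 : (im == 0) = false := by simp; omega
    rw [h0]
    simp only [Bool.false_eq_true, if_false]
    rw [PySem.List.pyRange_one_eq_nil (by omega), PySem.List.pyRange_one_eq_nil (by omega)]
    decide
  · subst hz; decide
  · have h0 : (im == 0) = false := by simp; omega
    rw [h0]
    simp only [Bool.false_eq_true, if_false]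
    obtain ⟨n, rfl⟩ : ∃ n : Nat, im = (n : Int) := ⟨im.toNat, by omega⟩
    apply PySem.List.sorted_eq_of_perm_of_pairwise_lt
    · exact (pv_fold_perm n).symm
    · simpa using PySem.List.pairwise_lt_pyRange_one (a := -(n : Int)) (b := (n : Int) + 1)
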